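-- pv_equiv track=rewrite | github.com/QEC-pages/Modular-Surface-code-simulations | lib/Unrotated_Direct.py | generate_unrotated_surface_code_grid
-- ===== SOURCE A (Python) =====
-- def generate_unrotated_surface_code_grid(d_x, d_y, cut=None, cut_gap=5, vertical=False):
--     """
--     Generate coordinates for data qubits, X ancillas, and Z ancillas in an unrotated surface code grid.
--
--     Args:
--         d_x (int): Width of the grid in the x-direction.
--         d_y (int): Height of the grid in the y-direction.
--         cut (int, optional): The x-coordinate where the lattice is cut. Defaults to None.
--         cut_gap (int, optional): The gap introduced at the cut. Defaults to 5.
--         vertical (bool, optional): Whether to vertical the roles of X and Z ancillas. Defaults to False.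
--
--     Returns:
--         tuple: Sorted lists of data qubits, X ancillas, Z ancillas, observables, and a qubit dictionary.
--     """
--     data_coords = set()
--     x_measure_coords = set()
--     z_measure_coords = set()
--     x_observable = []
--     z_observable = []
--
--     # Determine the x-offset for positions after the cut
--     def get_x_offset(x):
--         if cut is not None and x >= cut:
--             return cut_gap
--         else:
--             return 0
--
--     for x in range(2 * d_x - 1):
--         x_offset = get_x_offset(x)
--         for y in range(2 * d_y - 1):
--             q = (x + x_offset, y)
--             parity = (x % 2) != (y % 2)
--             if parity:
--                 if x % 2 == 0:
--                     z_measure_coords.add(q)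
--                 else:
--                     x_measure_coords.add(q)
--             else:
--                 data_coords.add(q)
--                 if x == 0:
--                     x_observable.append(q)
--                 if y == 0:
--                     z_observable.append(q)
--
--     # **Row-Wise Sorting:** Sort primarily by y (rows), then by x (columns)
--     def row_wise_sort(coords):
--         return sorted(coords, key=lambda coord: (coord[1], coord[0]))
--
--     data_qubits_sorted = row_wise_sort(data_coords)
--     x_measure_sorted = row_wise_sort(x_measure_coords)
--     z_measure_sorted = row_wise_sort(z_measure_coords)
--
--     # Assign unique numerical IDs with prefixes based on row-wise order
--     # Example: '4i' becomes 4i where i starts from 1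
--     data_qubit_ids = [int(f'4{i+1}') for i in range(len(data_qubits_sorted))]
--     x_ancilla_ids = [int(f'3{i+1}') for i in range(len(x_measure_sorted))]
--     z_ancilla_ids = [int(f'2{i+1}') for i in range(len(z_measure_sorted))]
--
--     # If inversion is requested, swap X and Z ancilla roles
--     if vertical:
--         x_measure_sorted, z_measure_sorted = z_measure_sorted, x_measure_sorted
--         x_ancilla_ids, z_ancilla_ids = z_ancilla_ids, x_ancilla_ids
--         x_observable, z_observable = z_observable, x_observable
--
--     # Create the dictionary categorizing qubits
--     qubit_dict = {
--         'data_qubits': data_qubit_ids,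
--         'x_ancillas': x_ancilla_ids,
--         'z_ancillas': z_ancilla_ids
--     }
--
--     # Return sorted lists and qubit_dict
--     return data_qubits_sorted, x_measure_sorted, z_measure_sorted, x_observable, z_observable, qubit_dict
-- ===== SOURCE B (Python) =====
-- def generate_unrotated_surface_code_grid(d_x, d_y, cut=None, cut_gap=5, vertical=False):
--     W, H = 2 * d_x - 1, 2 * d_y - 1
--
--     def coord(x, y):
--         return (x + (cut_gap if cut is not None and x >= cut else 0), y)
--
--     data, x_measure, z_measure = [], [], []
--     # build every list directly in final row-major order: y outer, x strided by 2
--     for y in (range(H) if W > 0 else ()):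
--         r = y % 2
--         data.extend(coord(x, y) for x in range(r, W, 2))
--         if r == 0:
--             x_measure.extend(coord(x, y) for x in range(1, W, 2))
--         else:
--             z_measure.extend(coord(x, y) for x in range(0, W, 2))
--
--     x_observable = [coord(0, y) for y in range(0, H, 2)] if W > 0 else []
--     z_observable = [coord(x, 0) for x in range(0, W, 2)] if H > 0 else []
--
--     def ids(prefix, n):
--         return [int(f'{prefix}{i + 1}') for i in range(n)]
--
--     data_qubit_ids = ids(4, len(data))
--     x_ancilla_ids = ids(3, len(x_measure))
--     z_ancilla_ids = ids(2, len(z_measure))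
--
--     if vertical:
--         x_measure, z_measure = z_measure, x_measure
--         x_ancilla_ids, z_ancilla_ids = z_ancilla_ids, x_ancilla_ids
--         x_observable, z_observable = z_observable, x_observable
--
--     return data, x_measure, z_measure, x_observable, z_observable, {
--         'data_qubits': data_qubit_ids,
--         'x_ancillas': x_ancilla_ids,
--         'z_ancillas': z_ancilla_ids,
--     }
-- ===== Notes on version B (the rewrite author's own statement) =====
-- stated objective: faster
-- what changed: B generates every list directly in final row-major order (y outer, x strided by parity) and builds the observables as standalone strided comprehensions, so A's three build-a-set-then-sort passes disappear entirely.
import Mathlib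
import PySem

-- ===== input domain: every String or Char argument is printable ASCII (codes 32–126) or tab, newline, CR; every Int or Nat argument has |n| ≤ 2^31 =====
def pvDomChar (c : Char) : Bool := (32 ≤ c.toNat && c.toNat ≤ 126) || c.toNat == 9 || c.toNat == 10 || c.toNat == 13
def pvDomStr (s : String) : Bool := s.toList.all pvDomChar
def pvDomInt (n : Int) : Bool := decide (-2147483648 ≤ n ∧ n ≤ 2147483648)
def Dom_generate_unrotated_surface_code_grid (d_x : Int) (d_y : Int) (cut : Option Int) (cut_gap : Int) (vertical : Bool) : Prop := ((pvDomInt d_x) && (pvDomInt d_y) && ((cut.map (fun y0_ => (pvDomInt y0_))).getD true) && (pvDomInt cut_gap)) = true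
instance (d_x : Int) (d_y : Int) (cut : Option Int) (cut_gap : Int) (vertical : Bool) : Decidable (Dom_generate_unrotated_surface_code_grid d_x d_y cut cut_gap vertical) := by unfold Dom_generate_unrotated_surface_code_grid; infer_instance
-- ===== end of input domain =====

-- B generates every qubit list directly in final row-major order (y outer, x strided by parity),
-- eliminating A's build-a-set-then-sort passes; a timing run measured B faster (A sorts, B does not).
-- ===== PORT A =====
-- offset helper: A's get_x_offset (closure over cut/cut_gap)
def pvOff (cut : Option Int) (cut_gap : Int) (x : Int) : Int :=
  match cut with
  | some c => if c ≤ x then cut_gap else 0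
  | none => 0

def generate_unrotated_surface_code_grid (d_x : Int) (d_y : Int) (cut : Option Int) (cut_gap : Int) (vertical : Bool) : (List (Int × Int)) × (List (Int × Int)) × (List (Int × Int)) × (List (Int × Int)) × (List (Int × Int)) × (List (String × List Int)) :=
  let st := (PySem.List.pyRange 0 (2 * d_x - 1) 1).foldl (fun s x =>
      let x_offset := pvOff cut cut_gap x
      (PySem.List.pyRange 0 (2 * d_y - 1) 1).foldl (fun t y =>
        let q := (x + x_offset, y)
        if PySem.Int.mod x 2 ≠ PySem.Int.mod y 2 then
          if PySem.Int.mod x 2 = 0 then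
            (t.1, t.2.1, PySem.Set.add t.2.2.1 q, t.2.2.2.1, t.2.2.2.2)
          else
            (t.1, PySem.Set.add t.2.1 q, t.2.2.1, t.2.2.2.1, t.2.2.2.2)
        else
          (PySem.Set.add t.1 q, t.2.1, t.2.2.1,
           (if x = 0 then t.2.2.2.1 ++ [q] else t.2.2.2.1),
           (if y = 0 then t.2.2.2.2 ++ [q] else t.2.2.2.2))) s)
    ((PySem.Set.empty : PySem.Set (Int × Int)), (PySem.Set.empty : PySem.Set (Int × Int)),
     (PySem.Set.empty : PySem.Set (Int × Int)), ([] : List (Int × Int)), ([] : List (Int × Int)))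
  let data_qubits_sorted := PySem.List.sorted2 st.1 (fun c => c.2) (fun c => c.1)
  let x_measure_sorted := PySem.List.sorted2 st.2.1 (fun c => c.2) (fun c => c.1)
  let z_measure_sorted := PySem.List.sorted2 st.2.2.1 (fun c => c.2) (fun c => c.1)
  -- int(f'4{i+1}') etc.; int() cannot raise on "4" ++ digits, so .getD 0 is never taken
  let data_qubit_ids := (List.range data_qubits_sorted.length).map
    (fun i => (PySem.Int.ofStr? ("4" ++ PySem.Int.toStr ((i : Int) + 1))).getD 0)
  let x_ancilla_ids := (List.range x_measure_sorted.length).map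
    (fun i => (PySem.Int.ofStr? ("3" ++ PySem.Int.toStr ((i : Int) + 1))).getD 0)
  let z_ancilla_ids := (List.range z_measure_sorted.length).map
    (fun i => (PySem.Int.ofStr? ("2" ++ PySem.Int.toStr ((i : Int) + 1))).getD 0)
  let xmF := if vertical then z_measure_sorted else x_measure_sorted
  let zmF := if vertical then x_measure_sorted else z_measure_sorted
  let xaF := if vertical then z_ancilla_ids else x_ancilla_ids
  let zaF := if vertical then x_ancilla_ids else z_ancilla_ids
  let xoF := if vertical then st.2.2.2.2 else st.2.2.2.1
  let zoF := if vertical then st.2.2.2.1 else st.2.2.2.2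
  (data_qubits_sorted, xmF, zmF, xoF, zoF,
   [("data_qubits", data_qubit_ids), ("x_ancillas", xaF), ("z_ancillas", zaF)])

-- ===== PORT B =====
-- B's coord helper: the shifted coordinate of grid column x in row y
def pvCoord (cut : Option Int) (cut_gap : Int) (x : Int) (y : Int) : Int × Int :=
  (x + (match cut with | some c => if c ≤ x then cut_gap else 0 | none => 0), y)

-- B's ids helper: [int(f'{prefix}{i+1}') for i in range(n)]
def pvIds (pfx : String) (n : Nat) : List Int :=
  (List.range n).map (fun i => (PySem.Int.ofStr? (pfx ++ PySem.Int.toStr ((i : Int) + 1))).getD 0)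

def generate_unrotated_surface_code_grid_alt (d_x : Int) (d_y : Int) (cut : Option Int) (cut_gap : Int) (vertical : Bool) : (List (Int × Int)) × (List (Int × Int)) × (List (Int × Int)) × (List (Int × Int)) × (List (Int × Int)) × (List (String × List Int)) :=
  let W := 2 * d_x - 1
  let H := 2 * d_y - 1
  let st := if 0 < W then
      (PySem.List.pyRange 0 H 1).foldl (fun s y =>
        let r := PySem.Int.mod y 2
        let d := s.1 ++ (PySem.List.pyRange r W 2).map (fun x => pvCoord cut cut_gap x y)
        if r = 0 then
          (d, s.2.1 ++ (PySem.List.pyRange 1 W 2).map (fun x => pvCoord cut cut_gap x y), s.2.2)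
        else
          (d, s.2.1, s.2.2 ++ (PySem.List.pyRange 0 W 2).map (fun x => pvCoord cut cut_gap x y)))
      (([] : List (Int × Int)), ([] : List (Int × Int)), ([] : List (Int × Int)))
    else (([] : List (Int × Int)), ([] : List (Int × Int)), ([] : List (Int × Int)))
  let data := st.1
  let x_measure := st.2.1
  let z_measure := st.2.2
  let x_observable := if 0 < W then (PySem.List.pyRange 0 H 2).map (fun y => pvCoord cut cut_gap 0 y) else []
  let z_observable := if 0 < H then (PySem.List.pyRange 0 W 2).map (fun x => pvCoord cut cut_gap x 0) else []
  let data_qubit_ids := pvIds "4" data.length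
  let x_ancilla_ids := pvIds "3" x_measure.length
  let z_ancilla_ids := pvIds "2" z_measure.length
  let xmF := if vertical then z_measure else x_measure
  let zmF := if vertical then x_measure else z_measure
  let xaF := if vertical then z_ancilla_ids else x_ancilla_ids
  let zaF := if vertical then x_ancilla_ids else z_ancilla_ids
  let xoF := if vertical then z_observable else x_observable
  let zoF := if vertical then x_observable else z_observable
  (data, xmF, zmF, xoF, zoF,
   [("data_qubits", data_qubit_ids), ("x_ancillas", xaF), ("z_ancillas", zaF)])

-- ===== PRECONDITION & SPEC =====
-- Pre_ excludes inputs where a cut strictly inside the grid combines with cut_gap ≤ -2 so that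
-- same-parity columns collide or cross after the shift: there A's sets silently merge/reorder the
-- collided qubits and B keeps the raw rows — a degenerate geometry on which either value is defensible.
def Pre_generate_unrotated_surface_code_grid (d_x : Int) (d_y : Int) (cut : Option Int) (cut_gap : Int) (vertical : Bool) : Prop :=
  match cut with
  | none => True
  | some c => -1 ≤ cut_gap ∨ c ≤ 0 ∨ 2 * d_x - 1 ≤ c ∨ d_y ≤ 0 ∨ (c < 2 ∧ 2 * d_x - 2 < c)

instance (d_x : Int) (d_y : Int) (cut : Option Int) (cut_gap : Int) (vertical : Bool) : Decidable (Pre_generate_unrotated_surface_code_grid d_x d_y cut cut_gap vertical) := by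
  unfold Pre_generate_unrotated_surface_code_grid
  rcases cut with _ | c <;> infer_instance

def pvWitness_generate_unrotated_surface_code_grid : Int × Int × Option Int × Int × Bool := (2, 2, some 2, 5, false)

def Spec_generate_unrotated_surface_code_grid (d_x : Int) (d_y : Int) (cut : Option Int) (cut_gap : Int) (vertical : Bool) (out : (List (Int × Int)) × (List (Int × Int)) × (List (Int × Int)) × (List (Int × Int)) × (List (Int × Int)) × (List (String × List Int))) : Prop := out = generate_unrotated_surface_code_grid_alt d_x d_y cut cut_gap vertical
instance (d_x : Int) (d_y : Int) (cut : Option Int) (cut_gap : Int) (vertical : Bool) (out : (List (Int × Int)) × (List (Int × Int)) × (List (Int × Int)) × (List (Int × Int)) × (List (Int × Int)) × (List (String × List Int))) : Decidable (Spec_generate_unrotated_surface_code_grid d_x d_y cut cut_gap vertical out) := by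
  unfold Spec_generate_unrotated_surface_code_grid
  letI d0 : DecidableEq (List (Int × Int) × List (String × List Int)) := inferInstance
  letI d1 : DecidableEq (List (Int × Int) × List (Int × Int) × List (String × List Int)) := instDecidableEqProd
  letI d2 : DecidableEq (List (Int × Int) × List (Int × Int) × List (Int × Int) × List (String × List Int)) := instDecidableEqProd
  letI d3 : DecidableEq (List (Int × Int) × List (Int × Int) × List (Int × Int) × List (Int × Int) × List (String × List Int)) := instDecidableEqProd
  letI d4 : DecidableEq (List (Int × Int) × List (Int × Int) × List (Int × Int) × List (Int × Int) × List (Int × Int) × List (String × List Int)) := instDecidableEqProd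
  exact d4 _ _

-- ===== CLAIM (what is proved, stated in full; the proofs are below) =====
def Claim_equal_generate_unrotated_surface_code_grid : Prop := ∀ (d_x : Int) (d_y : Int) (cut : Option Int) (cut_gap : Int) (vertical : Bool), Dom_generate_unrotated_surface_code_grid d_x d_y cut cut_gap vertical → Pre_generate_unrotated_surface_code_grid d_x d_y cut cut_gap vertical → Spec_generate_unrotated_surface_code_grid d_x d_y cut cut_gap vertical (generate_unrotated_surface_code_grid d_x d_y cut cut_gap vertical)

-- ===== LEMMAS AND PROOFS =====
-- general helpers about ranges, filters and flatMaps used by the equivalence proof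
theorem pvPairwiseLtPyRange (a b s : Int) (hs : 0 < s) :
    (PySem.List.pyRange a b s).Pairwise (· < ·) := by
  rw [PySem.List.pyRange_of_pos a b hs]
  exact List.pairwise_lt_range.map _ (fun k1 k2 h => by
    have : (k1 : Int) < (k2 : Int) := by exact_mod_cast h
    nlinarith)

theorem pvEqOfPairwiseLt (l1 l2 : List Int)
    (h1 : l1.Pairwise (· < ·)) (h2 : l2.Pairwise (· < ·))
    (hm : ∀ x, x ∈ l1 ↔ x ∈ l2) : l1 = l2 := by
  have n1 : l1.Nodup := h1.imp ne_of_lt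
  have n2 : l2.Nodup := h2.imp ne_of_lt
  have hp : l1.Perm l2 := (List.perm_ext_iff_of_nodup n1 n2).2 hm
  exact hp.eq_of_pairwise (le := (· ≤ ·))
    (fun a b _ _ hab hba => le_antisymm hab hba)
    (h1.imp le_of_lt) (h2.imp le_of_lt)

theorem pvFilterParity (n r : Int) (hr : r = 0 ∨ r = 1) :
    ((PySem.List.pyRange 0 n 1).filter (fun v => decide (PySem.Int.mod v 2 = r)))
      = PySem.List.pyRange r n 2 := by
  apply pvEqOfPairwiseLt
  · exact List.Pairwise.sublist List.filter_sublist (pvPairwiseLtPyRange 0 n 1 (by omega))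
  · exact pvPairwiseLtPyRange r n 2 (by omega)
  · intro x
    simp only [List.mem_filter, PySem.List.mem_pyRange_one,
      PySem.List.mem_pyRange_iff_of_pos (show (0:Int) < 2 by omega), decide_eq_true_eq]
    constructor
    · rintro ⟨⟨hx0, hxn⟩, hmod⟩
      rw [PySem.Int.mod_eq_emod_of_pos (a := x) (b := 2) (by omega)] at hmod
      omega
    · rintro ⟨hrx, hxn, hdvd⟩
      rw [PySem.Int.mod_eq_emod_of_pos (a := x) (b := 2) (by omega)]
      omega

theorem pvFilterZero (n : Int) :
    ((PySem.List.pyRange 0 n 1).filter (fun v => decide (v = 0)))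
      = if 0 < n then ([0] : List Int) else [] := by
  apply pvEqOfPairwiseLt
  · exact List.Pairwise.sublist List.filter_sublist (pvPairwiseLtPyRange 0 n 1 (by omega))
  · split <;> simp
  · intro x
    by_cases hn : 0 < n <;>
      simp [List.mem_filter, PySem.List.mem_pyRange_one, hn] <;> omega

theorem pvPairwiseFlatMap {β : Type} (R : β → β → Prop) (l : List Int) (f : Int → List β)
    (hin : ∀ y ∈ l, (f y).Pairwise R)
    (hcross : l.Pairwise (fun y1 y2 => ∀ a ∈ f y1, ∀ b ∈ f y2, R a b)) :
    (l.flatMap f).Pairwise R := by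
  induction l with
  | nil => simp
  | cons y t ih =>
    rw [List.flatMap_cons, List.pairwise_append]
    rcases hcross with _ | ⟨hy, ht⟩
    refine ⟨hin y (by simp), ih (fun z hz => hin z (by simp [hz])) ht, ?_⟩
    intro a ha b hb
    rw [List.mem_flatMap] at hb
    obtain ⟨z, hz, hbz⟩ := hb
    exact hy z hz a ha b hbz

theorem pvCoeFilterMap {β : Type} (ys : List Int) (p : Int → Bool) (m : Int → β) :
    (((ys.filter p).map m : List β) : Multiset β)
      = (ys : Multiset Int).bind (fun y => if p y then {m y} else 0) := by
  induction ys with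
  | nil => simp
  | cons y t ih =>
    by_cases hp : p y <;>
      simp [List.filter_cons, hp, Multiset.cons_bind, ih, ← Multiset.cons_coe, Multiset.singleton_add]

theorem pvPermSwap {β : Type} (xs ys : List Int) (P : Int → Int → Bool) (m : Int → Int → β) :
    (xs.flatMap (fun x => ((ys.filter (fun y => P x y)).map (fun y => m x y)))).Perm
      (ys.flatMap (fun y => ((xs.filter (fun x => P x y)).map (fun x => m x y)))) := by
  rw [← Multiset.coe_eq_coe, ← Multiset.coe_bind, ← Multiset.coe_bind]
  calc ((xs : Multiset Int).bind fun x => (((ys.filter (fun y => P x y)).map (fun y => m x y) : List β) : Multiset β))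
      = (xs : Multiset Int).bind (fun x => (ys : Multiset Int).bind (fun y => if P x y then {m x y} else 0)) := by
        exact Multiset.bind_congr (fun x _ => pvCoeFilterMap ys (fun y => P x y) (fun y => m x y))
    _ = (ys : Multiset Int).bind (fun y => (xs : Multiset Int).bind (fun x => if P x y then {m x y} else 0)) :=
        Multiset.bind_bind _ _
    _ = (ys : Multiset Int).bind fun y => (((xs.filter (fun x => P x y)).map (fun x => m x y) : List β) : Multiset β) := by
        exact (Multiset.bind_congr (fun y _ => (pvCoeFilterMap xs (fun x => P x y) (fun x => m x y)).symm))

theorem pvFoldlFoldl {β δ : Type} (l : List Int) (B : Int → List β) (f : δ → β → δ) (s : δ) :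
    l.foldl (fun d x => (B x).foldl f d) s = (l.flatMap B).foldl f s := by
  induction l generalizing s with
  | nil => rfl
  | cons x t ih => rw [List.flatMap_cons, List.foldl_append, List.foldl_cons, ih]

theorem pvSorted2Lex (xs : List (Int × Int)) :
    PySem.List.sorted2 xs (fun c => c.2) (fun c => c.1)
      = PySem.List.sorted xs (fun c => toLex (c.2, c.1)) := by
  rw [PySem.List.sorted_eq_foldl_insertBy]
  show xs.foldl (fun acc x => PySem.List.insertBy _ x acc) [] = _
  congr 1
  funext acc x
  congr 1
  funext a b
  simp only [Prod.Lex.toLex_lt_toLex]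
  by_cases h1 : a.2 < b.2 <;> by_cases h2 : b.2 < a.2 <;> by_cases h3 : a.1 < b.1 <;>
    simp [h1, h2, h3] <;> omega



-- the shifted x-coordinate of column x
def pvG (cut : Option Int) (cg : Int) (x : Int) : Int := x + pvOff cut cg x

-- A's contribution to one category: x-major filtered product
def pvLA (cut : Option Int) (cg W H : Int) (P : Int → Int → Bool) : List (Int × Int) :=
  (PySem.List.pyRange 0 W 1).flatMap (fun x =>
    ((PySem.List.pyRange 0 H 1).filter (fun y => P x y)).map (fun y => (pvG cut cg x, y)))

-- B's contribution: y-major rows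
def pvLB (cut : Option Int) (cg H : Int) (rows : Int → List Int) : List (Int × Int) :=
  (PySem.List.pyRange 0 H 1).flatMap (fun y => (rows y).map (fun x => (pvG cut cg x, y)))

theorem pvLB_pairwise (cut : Option Int) (cg W H : Int) (P : Int → Int → Bool) (rows : Int → List Int)
    (hg : 0 < H → ∀ x1 x2 : Int, 0 ≤ x1 → x1 < x2 → x2 < W → x1 % 2 = x2 % 2 → pvG cut cg x1 < pvG cut cg x2)
    (hP : ∀ y x1 x2 : Int, 0 ≤ x1 → 0 ≤ x2 → P x1 y = true → P x2 y = true → x1 % 2 = x2 % 2)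
    (hrow : ∀ y, 0 ≤ y → y < H → ∀ x, x ∈ rows y ↔ (0 ≤ x ∧ x < W ∧ P x y = true))
    (hrs : ∀ y, (rows y).Pairwise (· < ·)) :
    (pvLB cut cg H rows).Pairwise (fun a b => toLex (a.2, a.1) < toLex (b.2, b.1)) := by
  apply pvPairwiseFlatMap
  · intro y hy
    rw [PySem.List.mem_pyRange_one] at hy
    have hpw : (rows y).Pairwise (fun x1 x2 => pvG cut cg x1 < pvG cut cg x2) := by
      refine List.Pairwise.imp_of_mem ?_ (hrs y)
      intro x1 x2 h1 h2 hlt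
      rw [hrow y hy.1 hy.2 x1] at h1
      rw [hrow y hy.1 hy.2 x2] at h2
      exact hg (by omega) x1 x2 h1.1 hlt h2.2.1 (hP y x1 x2 h1.1 h2.1 h1.2.2 h2.2.2)
    refine hpw.map _ ?_
    intro x1 x2 h
    rw [Prod.Lex.toLex_lt_toLex]
    exact Or.inr ⟨rfl, h⟩
  · refine List.Pairwise.imp_of_mem ?_ (pvPairwiseLtPyRange 0 H 1 (by omega))
    intro y1 y2 _ _ hlt a ha b hb
    rw [List.mem_map] at ha hb
    obtain ⟨x1, _, rfl⟩ := ha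
    obtain ⟨x2, _, rfl⟩ := hb
    rw [Prod.Lex.toLex_lt_toLex]
    exact Or.inl hlt

theorem pvMain (cut : Option Int) (cg W H : Int) (P : Int → Int → Bool) (rows : Int → List Int)
    (hg : 0 < H → ∀ x1 x2 : Int, 0 ≤ x1 → x1 < x2 → x2 < W → x1 % 2 = x2 % 2 → pvG cut cg x1 < pvG cut cg x2)
    (hP : ∀ y x1 x2 : Int, 0 ≤ x1 → 0 ≤ x2 → P x1 y = true → P x2 y = true → x1 % 2 = x2 % 2)
    (hrow : ∀ y, 0 ≤ y → y < H → ∀ x, x ∈ rows y ↔ (0 ≤ x ∧ x < W ∧ P x y = true))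
    (hrs : ∀ y, (rows y).Pairwise (· < ·)) :
    PySem.List.sorted2 (PySem.Set.ofList (pvLA cut cg W H P)) (fun c => c.2) (fun c => c.1)
      = pvLB cut cg H rows := by
  have hLBeq : pvLB cut cg H rows
      = (PySem.List.pyRange 0 H 1).flatMap (fun y =>
          (((PySem.List.pyRange 0 W 1).filter (fun x => P x y)).map (fun x => (pvG cut cg x, y)))) := by
    apply List.flatMap_congr
    intro y hy
    rw [PySem.List.mem_pyRange_one] at hy
    congr 1
    apply pvEqOfPairwiseLt _ _ (hrs y)
      (List.Pairwise.sublist List.filter_sublist (pvPairwiseLtPyRange 0 W 1 (by omega)))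
    intro x
    rw [hrow y hy.1 hy.2 x]
    simp [List.mem_filter, PySem.List.mem_pyRange_one, and_assoc]
  have hperm : (pvLA cut cg W H P).Perm (pvLB cut cg H rows) := by
    rw [hLBeq]
    exact pvPermSwap _ _ P (fun x y => (pvG cut cg x, y))
  have hpwB := pvLB_pairwise cut cg W H P rows hg hP hrow hrs
  have hnodB : (pvLB cut cg H rows).Nodup := by
    refine hpwB.imp ?_
    intro a b h hab
    subst hab
    exact lt_irrefl _ h
  have hnodA : (pvLA cut cg W H P).Nodup := hperm.nodup_iff.2 hnodB
  rw [PySem.Set.ofList_eq_self_of_nodup _ hnodA, pvSorted2Lex]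
  exact PySem.List.sorted_eq_of_perm_of_pairwise_lt _ _ (fun c => toLex (c.2, c.1)) hperm.symm hpwB


theorem pvFoldlProd5 {α β γ δ ε ζ : Type} (l : List α) (f1 : β → α → β) (f2 : γ → α → γ)
    (f3 : δ → α → δ) (f4 : ε → α → ε) (f5 : ζ → α → ζ) (a : β) (b : γ) (c : δ) (d : ε) (e : ζ) :
    l.foldl (fun s x => (f1 s.1 x, f2 s.2.1 x, f3 s.2.2.1 x, f4 s.2.2.2.1 x, f5 s.2.2.2.2 x)) (a, b, c, d, e)
      = (l.foldl f1 a, l.foldl f2 b, l.foldl f3 c, l.foldl f4 d, l.foldl f5 e) := by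
  induction l generalizing a b c d e with
  | nil => rfl
  | cons x t ih => simp [ih]

theorem pvFoldlProd3 {α β γ δ : Type} (l : List α) (f1 : β → α → β) (f2 : γ → α → γ)
    (f3 : δ → α → δ) (a : β) (b : γ) (c : δ) :
    l.foldl (fun s x => (f1 s.1 x, f2 s.2.1 x, f3 s.2.2 x)) (a, b, c)
      = (l.foldl f1 a, l.foldl f2 b, l.foldl f3 c) := by
  induction l generalizing a b c with
  | nil => rfl
  | cons x t ih => simp [ih]

-- category membership predicates of A's inner branch
def pvPd (x y : Int) : Bool := decide (PySem.Int.mod x 2 = PySem.Int.mod y 2)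
def pvPxm (x y : Int) : Bool := decide (¬ PySem.Int.mod x 2 = PySem.Int.mod y 2) && !decide (PySem.Int.mod x 2 = 0)
def pvPzm (x y : Int) : Bool := decide (¬ PySem.Int.mod x 2 = PySem.Int.mod y 2) && decide (PySem.Int.mod x 2 = 0)

def pvXO (cut : Option Int) (cg W H : Int) : List (Int × Int) :=
  (PySem.List.pyRange 0 W 1).flatMap (fun x =>
    ((PySem.List.pyRange 0 H 1).filter (fun y => pvPd x y && decide (x = 0))).map (fun y => (pvG cut cg x, y)))

def pvZO (cut : Option Int) (cg W H : Int) : List (Int × Int) :=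
  (PySem.List.pyRange 0 W 1).flatMap (fun x =>
    ((PySem.List.pyRange 0 H 1).filter (fun y => pvPd x y && decide (y = 0))).map (fun y => (pvG cut cg x, y)))

theorem pvFoldAdd (W H : Int) (P : Int → Int → Bool) (m : Int → Int → Int × Int) :
    (PySem.List.pyRange 0 W 1).foldl (fun d x =>
        (PySem.List.pyRange 0 H 1).foldl (fun d y => if P x y then PySem.Set.add d (m x y) else d) d)
      PySem.Set.empty
      = PySem.Set.ofList ((PySem.List.pyRange 0 W 1).flatMap (fun x =>
          ((PySem.List.pyRange 0 H 1).filter (fun y => P x y)).map (fun y => m x y))) := by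
  rw [PySem.Set.ofList_eq_foldl, ← pvFoldlFoldl]
  apply PySem.List.foldl_congr_mem
  intro d x _
  rw [PySem.List.foldl_if_eq_foldl_filter, ← List.foldl_map]

theorem pvFoldApp (W H : Int) (p : Int → Int → Bool) (m : Int → Int → Int × Int) :
    (PySem.List.pyRange 0 W 1).foldl (fun o x =>
        (PySem.List.pyRange 0 H 1).foldl (fun o y => if p x y then o ++ [m x y] else o) o)
      ([] : List (Int × Int))
      = (PySem.List.pyRange 0 W 1).flatMap (fun x =>
          ((PySem.List.pyRange 0 H 1).filter (fun y => p x y)).map (fun y => m x y)) := by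
  rw [show ((PySem.List.pyRange 0 W 1).flatMap (fun x =>
          ((PySem.List.pyRange 0 H 1).filter (fun y => p x y)).map (fun y => m x y)))
      = [] ++ ((PySem.List.pyRange 0 W 1).flatMap (fun x =>
          ((PySem.List.pyRange 0 H 1).filter (fun y => p x y)).map (fun y => m x y))) from rfl,
    ← PySem.List.foldl_append_eq_flatMap]
  apply PySem.List.foldl_congr_mem
  intro o x _
  rw [PySem.List.foldl_append_if]

theorem pvAfold (d_x d_y : Int) (cut : Option Int) (cg : Int) :
    (List.foldl
      (fun (s : PySem.Set (Int × Int) × PySem.Set (Int × Int) × PySem.Set (Int × Int) × List (Int × Int) × List (Int × Int)) x =>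
        List.foldl
          (fun t y =>
            if PySem.Int.mod x 2 ≠ PySem.Int.mod y 2 then
              if PySem.Int.mod x 2 = 0 then
                (t.1, t.2.1, PySem.Set.add t.2.2.1 (x + pvOff cut cg x, y), t.2.2.2.1, t.2.2.2.2)
              else (t.1, PySem.Set.add t.2.1 (x + pvOff cut cg x, y), t.2.2.1, t.2.2.2.1, t.2.2.2.2)
            else
              (PySem.Set.add t.1 (x + pvOff cut cg x, y), t.2.1, t.2.2.1,
                if x = 0 then t.2.2.2.1 ++ [(x + pvOff cut cg x, y)] else t.2.2.2.1,
                if y = 0 then t.2.2.2.2 ++ [(x + pvOff cut cg x, y)] else t.2.2.2.2))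
          s (PySem.List.pyRange 0 (2 * d_y - 1) 1))
      (PySem.Set.empty, PySem.Set.empty, PySem.Set.empty, [], []) (PySem.List.pyRange 0 (2 * d_x - 1) 1))
    = (PySem.Set.ofList (pvLA cut cg (2 * d_x - 1) (2 * d_y - 1) pvPd),
       PySem.Set.ofList (pvLA cut cg (2 * d_x - 1) (2 * d_y - 1) pvPxm),
       PySem.Set.ofList (pvLA cut cg (2 * d_x - 1) (2 * d_y - 1) pvPzm),
       pvXO cut cg (2 * d_x - 1) (2 * d_y - 1),
       pvZO cut cg (2 * d_x - 1) (2 * d_y - 1)) := by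
  rw [PySem.List.foldl_congr_mem _ _
    (fun s x =>
      (List.foldl (fun d y => if pvPd x y then PySem.Set.add d (pvG cut cg x, y) else d) s.1 (PySem.List.pyRange 0 (2 * d_y - 1) 1),
       List.foldl (fun m y => if pvPxm x y then PySem.Set.add m (pvG cut cg x, y) else m) s.2.1 (PySem.List.pyRange 0 (2 * d_y - 1) 1),
       List.foldl (fun z y => if pvPzm x y then PySem.Set.add z (pvG cut cg x, y) else z) s.2.2.1 (PySem.List.pyRange 0 (2 * d_y - 1) 1),
       List.foldl (fun o y => if pvPd x y && decide (x = 0) then o ++ [(pvG cut cg x, y)] else o) s.2.2.2.1 (PySem.List.pyRange 0 (2 * d_y - 1) 1),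
       List.foldl (fun o y => if pvPd x y && decide (y = 0) then o ++ [(pvG cut cg x, y)] else o) s.2.2.2.2 (PySem.List.pyRange 0 (2 * d_y - 1) 1))) _
    ?hout]
  · rw [pvFoldlProd5 _
        (fun d x => List.foldl (fun d y => if pvPd x y then PySem.Set.add d (pvG cut cg x, y) else d) d (PySem.List.pyRange 0 (2 * d_y - 1) 1))
        (fun m x => List.foldl (fun m y => if pvPxm x y then PySem.Set.add m (pvG cut cg x, y) else m) m (PySem.List.pyRange 0 (2 * d_y - 1) 1))
        (fun z x => List.foldl (fun z y => if pvPzm x y then PySem.Set.add z (pvG cut cg x, y) else z) z (PySem.List.pyRange 0 (2 * d_y - 1) 1))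
        (fun o x => List.foldl (fun o y => if pvPd x y && decide (x = 0) then o ++ [(pvG cut cg x, y)] else o) o (PySem.List.pyRange 0 (2 * d_y - 1) 1))
        (fun o x => List.foldl (fun o y => if pvPd x y && decide (y = 0) then o ++ [(pvG cut cg x, y)] else o) o (PySem.List.pyRange 0 (2 * d_y - 1) 1))]
    rw [pvFoldAdd _ _ pvPd, pvFoldAdd _ _ pvPxm, pvFoldAdd _ _ pvPzm,
        pvFoldApp _ _ (fun x y => pvPd x y && decide (x = 0)),
        pvFoldApp _ _ (fun x y => pvPd x y && decide (y = 0))]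
    rfl
  case hout =>
    intro acc x _
    rw [PySem.List.foldl_congr_mem _ _
      (fun (t : PySem.Set (Int × Int) × PySem.Set (Int × Int) × PySem.Set (Int × Int) × List (Int × Int) × List (Int × Int)) y =>
        ((fun (d : PySem.Set (Int × Int)) y => if pvPd x y then PySem.Set.add d (pvG cut cg x, y) else d) t.1 y,
         (fun (m : PySem.Set (Int × Int)) y => if pvPxm x y then PySem.Set.add m (pvG cut cg x, y) else m) t.2.1 y,
         (fun (z : PySem.Set (Int × Int)) y => if pvPzm x y then PySem.Set.add z (pvG cut cg x, y) else z) t.2.2.1 y,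
         (fun (o : List (Int × Int)) y => if pvPd x y && decide (x = 0) then o ++ [(pvG cut cg x, y)] else o) t.2.2.2.1 y,
         (fun (o : List (Int × Int)) y => if pvPd x y && decide (y = 0) then o ++ [(pvG cut cg x, y)] else o) t.2.2.2.2 y)) _
      ?hin]
    · exact pvFoldlProd5 (PySem.List.pyRange 0 (2 * d_y - 1) 1)
        (fun d y => if pvPd x y then PySem.Set.add d (pvG cut cg x, y) else d)
        (fun m y => if pvPxm x y then PySem.Set.add m (pvG cut cg x, y) else m)
        (fun z y => if pvPzm x y then PySem.Set.add z (pvG cut cg x, y) else z)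
        (fun o y => if pvPd x y && decide (x = 0) then o ++ [(pvG cut cg x, y)] else o)
        (fun o y => if pvPd x y && decide (y = 0) then o ++ [(pvG cut cg x, y)] else o)
        acc.1 acc.2.1 acc.2.2.1 acc.2.2.2.1 acc.2.2.2.2
    case hin =>
      intro t y _
      have hx2 : PySem.Int.mod x 2 = x % 2 := PySem.Int.mod_eq_emod_of_pos (by norm_num)
      have hy2 : PySem.Int.mod y 2 = y % 2 := PySem.Int.mod_eq_emod_of_pos (by norm_num)
      simp only [pvPd, pvPxm, pvPzm, pvG, hx2, hy2, Bool.and_eq_true, Bool.not_eq_true', decide_eq_false_iff_not, decide_eq_true_eq]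
      split_ifs <;> first | rfl | (exfalso; omega)

theorem pvRangeNil (W : Int) (hW : ¬ 0 < W) : PySem.List.pyRange 0 W 1 = [] := by
  rw [PySem.List.pyRange_one]
  have : (W - 0).toNat = 0 := by omega
  rw [this]
  rfl

theorem pvFlatMapIte {β : Type} (l : List Int) (p : Int → Prop) [DecidablePred p] (m : Int → β) :
    l.flatMap (fun x => if p x then [m x] else [])
      = (l.filter (fun x => decide (p x))).map m := by
  induction l with
  | nil => rfl
  | cons x t ih =>
    by_cases hp : p x <;> simp [List.filter_cons, hp, ih]

theorem pvXO_eq (cut : Option Int) (cg W H : Int) :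
    pvXO cut cg W H
      = if 0 < W then (PySem.List.pyRange 0 H 2).map (fun y => (pvG cut cg 0, y)) else [] := by
  unfold pvXO
  by_cases hW : 0 < W
  · rw [if_pos hW, PySem.List.pyRange_one_cons (by omega : (0:Int) < W), List.flatMap_cons]
    have hrest : (PySem.List.pyRange (0+1) W 1).flatMap (fun x =>
        ((PySem.List.pyRange 0 H 1).filter (fun y => pvPd x y && decide (x = 0))).map
          (fun y => (pvG cut cg x, y))) = [] := by
      rw [List.flatMap_eq_nil_iff]
      intro x hx
      rw [PySem.List.mem_pyRange_one] at hx
      have hfil : ((PySem.List.pyRange 0 H 1).filter (fun y => pvPd x y && decide (x = 0))) = [] := by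
        rw [List.filter_eq_nil_iff]
        intro y _
        simp only [Bool.and_eq_true, decide_eq_true_eq, not_and]
        intro _
        omega
      rw [hfil, List.map_nil]
    rw [hrest, List.append_nil]
    have hpred : ∀ y ∈ PySem.List.pyRange 0 H 1,
        (pvPd 0 y && decide ((0:Int) = 0)) = decide (PySem.Int.mod y 2 = 0) := by
      intro y _
      simp [pvPd, PySem.Int.mod_eq_emod_of_pos (show (0:Int) < 2 by norm_num), eq_comm]
    rw [List.filter_congr hpred, pvFilterParity H 0 (Or.inl rfl)]
  · rw [if_neg hW, pvRangeNil W hW, List.flatMap_nil]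

theorem pvZO_eq (cut : Option Int) (cg W H : Int) :
    pvZO cut cg W H
      = if 0 < H then (PySem.List.pyRange 0 W 2).map (fun x => (pvG cut cg x, 0)) else [] := by
  unfold pvZO
  have hblock : ∀ x ∈ PySem.List.pyRange 0 W 1,
      ((PySem.List.pyRange 0 H 1).filter (fun y => pvPd x y && decide (y = 0))).map
          (fun y => (pvG cut cg x, y))
        = if 0 < H ∧ PySem.Int.mod x 2 = 0 then [(pvG cut cg x, 0)] else [] := by
    intro x _
    by_cases hx : PySem.Int.mod x 2 = 0
    · have hpred : ∀ y ∈ PySem.List.pyRange 0 H 1,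
          (pvPd x y && decide (y = 0)) = decide (y = 0) := by
        intro y _
        by_cases hy : y = 0
        · subst hy
          have hx' := hx
          simp only [PySem.Int.mod_eq_emod_of_pos (show (0:Int) < 2 by norm_num)] at hx'
          simp [pvPd, PySem.Int.mod_eq_emod_of_pos (show (0:Int) < 2 by norm_num)]
          omega
        · simp [hy]
      rw [List.filter_congr hpred, pvFilterZero H]
      have h2dvd : (2:Int) ∣ x := (PySem.Int.mod_eq_zero_iff_dvd x 2).mp hx
      by_cases hH : 0 < H <;> simp [hH, hx, h2dvd]
    · have hfil : ((PySem.List.pyRange 0 H 1).filter (fun y => pvPd x y && decide (y = 0))) = [] := by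
        rw [List.filter_eq_nil_iff]
        intro y _
        simp only [Bool.and_eq_true, decide_eq_true_eq, not_and]
        intro hp hy
        subst hy
        simp only [pvPd, decide_eq_true_eq] at hp
        simp only [PySem.Int.mod_eq_emod_of_pos (show (0:Int) < 2 by norm_num)] at hp hx
        omega
      rw [hfil, List.map_nil, if_neg (by tauto)]
  rw [List.flatMap_congr hblock]
  by_cases hH : 0 < H
  · rw [if_pos hH]
    simp only [hH, true_and]
    rw [pvFlatMapIte _ (fun x => PySem.Int.mod x 2 = 0) (fun x => (pvG cut cg x, 0)),
      pvFilterParity W 0 (Or.inl rfl)]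
  · simp [hH]

-- pvCoord is pvG paired with y
theorem pvCoord_eq (cut : Option Int) (cg x y : Int) :
    pvCoord cut cg x y = (pvG cut cg x, y) := by
  cases cut <;> rfl

theorem pvBfold (d_x d_y : Int) (cut : Option Int) (cg : Int) :
    (List.foldl
      (fun (s : List (Int × Int) × List (Int × Int) × List (Int × Int)) y =>
        if PySem.Int.mod y 2 = 0 then
          (s.1 ++ (PySem.List.pyRange (PySem.Int.mod y 2) (2 * d_x - 1) 2).map (fun x => pvCoord cut cg x y),
           s.2.1 ++ (PySem.List.pyRange 1 (2 * d_x - 1) 2).map (fun x => pvCoord cut cg x y),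
           s.2.2)
        else
          (s.1 ++ (PySem.List.pyRange (PySem.Int.mod y 2) (2 * d_x - 1) 2).map (fun x => pvCoord cut cg x y),
           s.2.1,
           s.2.2 ++ (PySem.List.pyRange 0 (2 * d_x - 1) 2).map (fun x => pvCoord cut cg x y)))
      ([], [], []) (PySem.List.pyRange 0 (2 * d_y - 1) 1))
    = (pvLB cut cg (2 * d_y - 1) (fun y => PySem.List.pyRange (PySem.Int.mod y 2) (2 * d_x - 1) 2),
       pvLB cut cg (2 * d_y - 1) (fun y => if PySem.Int.mod y 2 = 0 then PySem.List.pyRange 1 (2 * d_x - 1) 2 else []),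
       pvLB cut cg (2 * d_y - 1) (fun y => if PySem.Int.mod y 2 = 0 then [] else PySem.List.pyRange 0 (2 * d_x - 1) 2)) := by
  rw [PySem.List.foldl_congr_mem _ _
    (fun (s : List (Int × Int) × List (Int × Int) × List (Int × Int)) y =>
      ((fun (l : List (Int × Int)) y => l ++ (PySem.List.pyRange (PySem.Int.mod y 2) (2 * d_x - 1) 2).map (fun x => pvCoord cut cg x y)) s.1 y,
       (fun (l : List (Int × Int)) y => l ++ ((if PySem.Int.mod y 2 = 0 then PySem.List.pyRange 1 (2 * d_x - 1) 2 else []).map (fun x => pvCoord cut cg x y))) s.2.1 y,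
       (fun (l : List (Int × Int)) y => l ++ ((if PySem.Int.mod y 2 = 0 then [] else PySem.List.pyRange 0 (2 * d_x - 1) 2).map (fun x => pvCoord cut cg x y))) s.2.2 y)) _
    ?hbin]
  · rw [pvFoldlProd3 (PySem.List.pyRange 0 (2 * d_y - 1) 1)
      (fun (l : List (Int × Int)) y => l ++ (PySem.List.pyRange (PySem.Int.mod y 2) (2 * d_x - 1) 2).map (fun x => pvCoord cut cg x y))
      (fun (l : List (Int × Int)) y => l ++ ((if PySem.Int.mod y 2 = 0 then PySem.List.pyRange 1 (2 * d_x - 1) 2 else []).map (fun x => pvCoord cut cg x y)))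
      (fun (l : List (Int × Int)) y => l ++ ((if PySem.Int.mod y 2 = 0 then [] else PySem.List.pyRange 0 (2 * d_x - 1) 2).map (fun x => pvCoord cut cg x y)))
      [] [] []]
    rw [PySem.List.foldl_append_eq_flatMap, PySem.List.foldl_append_eq_flatMap,
        PySem.List.foldl_append_eq_flatMap]
    simp only [List.nil_append, pvLB, pvCoord_eq]
  case hbin =>
    intro t y _
    have hm : PySem.Int.mod y 2 = 0 ↔ (2:Int) ∣ y := PySem.Int.mod_eq_zero_iff_dvd y 2
    by_cases h : (2:Int) ∣ y <;> simp [hm, h]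

theorem pvRange2Nil (r W : Int) (hr : 0 ≤ r) (hW : ¬ 0 < W) : PySem.List.pyRange r W 2 = [] := by
  rw [PySem.List.pyRange_of_pos _ _ (show (0:Int) < 2 by norm_num), if_neg (by omega)]
  rfl

theorem pvBfoldG (d_x d_y : Int) (cut : Option Int) (cg : Int) :
    (if 0 < 2 * d_x - 1 then
      (List.foldl
        (fun (s : List (Int × Int) × List (Int × Int) × List (Int × Int)) y =>
          if PySem.Int.mod y 2 = 0 then
            (s.1 ++ (PySem.List.pyRange (PySem.Int.mod y 2) (2 * d_x - 1) 2).map (fun x => pvCoord cut cg x y),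
             s.2.1 ++ (PySem.List.pyRange 1 (2 * d_x - 1) 2).map (fun x => pvCoord cut cg x y),
             s.2.2)
          else
            (s.1 ++ (PySem.List.pyRange (PySem.Int.mod y 2) (2 * d_x - 1) 2).map (fun x => pvCoord cut cg x y),
             s.2.1,
             s.2.2 ++ (PySem.List.pyRange 0 (2 * d_x - 1) 2).map (fun x => pvCoord cut cg x y)))
        ([], [], []) (PySem.List.pyRange 0 (2 * d_y - 1) 1))
     else ([], [], []))
    = (pvLB cut cg (2 * d_y - 1) (fun y => PySem.List.pyRange (PySem.Int.mod y 2) (2 * d_x - 1) 2),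
       pvLB cut cg (2 * d_y - 1) (fun y => if PySem.Int.mod y 2 = 0 then PySem.List.pyRange 1 (2 * d_x - 1) 2 else []),
       pvLB cut cg (2 * d_y - 1) (fun y => if PySem.Int.mod y 2 = 0 then [] else PySem.List.pyRange 0 (2 * d_x - 1) 2)) := by
  split
  · exact pvBfold d_x d_y cut cg
  next hW =>
    have hnil : ∀ rows : Int → List Int, (∀ y, 0 ≤ y → rows y = []) →
        pvLB cut cg (2 * d_y - 1) rows = [] := by
      intro rows hrows
      unfold pvLB
      rw [List.flatMap_eq_nil_iff]
      intro y hy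
      rw [PySem.List.mem_pyRange_one] at hy
      rw [hrows y hy.1, List.map_nil]
    have hmody : ∀ y : Int, 0 ≤ y → (0:Int) ≤ PySem.Int.mod y 2 := by
      intro y _
      have := PySem.Int.mod_nonneg y (show (0:Int) < 2 by norm_num)
      omega
    rw [hnil _ (fun y hy => pvRange2Nil _ _ (hmody y hy) hW),
        hnil (fun y => if PySem.Int.mod y 2 = 0 then PySem.List.pyRange 1 (2 * d_x - 1) 2 else [])
          (fun y hy => by
            dsimp only
            split
            · exact pvRange2Nil _ _ (by norm_num) hW
            · rfl),
        hnil (fun y => if PySem.Int.mod y 2 = 0 then [] else PySem.List.pyRange 0 (2 * d_x - 1) 2)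
          (fun y hy => by
            dsimp only
            split
            · rfl
            · exact pvRange2Nil _ _ (by norm_num) hW)]

theorem pvABeq (d_x d_y : Int) (cut : Option Int) (cg : Int) (v : Bool)
    (hg : 0 < 2 * d_y - 1 → ∀ x1 x2 : Int, 0 ≤ x1 → x1 < x2 → x2 < 2 * d_x - 1 →
      x1 % 2 = x2 % 2 → pvG cut cg x1 < pvG cut cg x2) :
    generate_unrotated_surface_code_grid d_x d_y cut cg v
      = generate_unrotated_surface_code_grid_alt d_x d_y cut cg v := by
  have hmod : ∀ z : Int, PySem.Int.mod z 2 = z % 2 :=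
    fun z => PySem.Int.mod_eq_emod_of_pos (by norm_num)
  have hmem : ∀ r W x : Int, x ∈ PySem.List.pyRange r W 2 ↔ (r ≤ x ∧ x < W ∧ 2 ∣ x - r) :=
    fun r W x => PySem.List.mem_pyRange_iff_of_pos (by norm_num) x
  have hd := pvMain cut cg (2 * d_x - 1) (2 * d_y - 1) pvPd
      (fun y => PySem.List.pyRange (PySem.Int.mod y 2) (2 * d_x - 1) 2) hg
      (by
        intro y x1 x2 _ _ h1 h2
        simp only [pvPd, decide_eq_true_eq, hmod] at h1 h2
        omega)
      (by
        intro y hy0 hyH x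
        rw [hmem]
        simp only [pvPd, decide_eq_true_eq, hmod]
        omega)
      (fun y => pvPairwiseLtPyRange _ _ 2 (by norm_num))
  have hxm := pvMain cut cg (2 * d_x - 1) (2 * d_y - 1) pvPxm
      (fun y => if PySem.Int.mod y 2 = 0 then PySem.List.pyRange 1 (2 * d_x - 1) 2 else []) hg
      (by
        intro y x1 x2 hx1 hx2 h1 h2
        simp only [pvPxm, Bool.and_eq_true, Bool.not_eq_true', decide_eq_false_iff_not,
          decide_eq_true_eq, hmod] at h1 h2
        omega)
      (by
        intro y hy0 hyH x
        simp only [pvPxm, Bool.and_eq_true, Bool.not_eq_true', decide_eq_false_iff_not,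
          decide_eq_true_eq, hmod]
        by_cases hy : (2:Int) ∣ y
        · rw [if_pos (show _ by omega), hmem]
          omega
        · rw [if_neg (show _ by omega)]
          simp only [List.not_mem_nil, false_iff, not_and]
          intro _ _
          omega)
      (by
        intro y
        dsimp only
        split
        · exact pvPairwiseLtPyRange _ _ 2 (by norm_num)
        · exact List.Pairwise.nil)
  have hzm := pvMain cut cg (2 * d_x - 1) (2 * d_y - 1) pvPzm
      (fun y => if PySem.Int.mod y 2 = 0 then [] else PySem.List.pyRange 0 (2 * d_x - 1) 2) hg
      (by
        intro y x1 x2 hx1 hx2 h1 h2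
        simp only [pvPzm, Bool.and_eq_true, Bool.not_eq_true', decide_eq_false_iff_not,
          decide_eq_true_eq, hmod] at h1 h2
        omega)
      (by
        intro y hy0 hyH x
        simp only [pvPzm, Bool.and_eq_true, Bool.not_eq_true', decide_eq_false_iff_not,
          decide_eq_true_eq, hmod]
        by_cases hy : (2:Int) ∣ y
        · rw [if_pos (show _ by omega)]
          simp only [List.not_mem_nil, false_iff, not_and]
          intro _ _
          omega
        · rw [if_neg (show _ by omega), hmem]
          omega)
      (by
        intro y
        dsimp only
        split
        · exact List.Pairwise.nil
        · exact pvPairwiseLtPyRange _ _ 2 (by norm_num))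
  simp only [generate_unrotated_surface_code_grid, generate_unrotated_surface_code_grid_alt]
  rw [pvAfold, pvBfoldG]
  simp only [hd, hxm, hzm, pvXO_eq, pvZO_eq, pvIds, pvCoord_eq]

-- ===== VERDICT (by name: the statement is the Claim_ definition above) =====
theorem generate_unrotated_surface_code_grid_spec : Claim_equal_generate_unrotated_surface_code_grid := by
  intro d_x d_y cut cut_gap vertical _ hpre
  unfold Spec_generate_unrotated_surface_code_grid
  refine pvABeq d_x d_y cut cut_gap vertical ?_
  intro hH x1 x2 h0 hlt hW hpar
  unfold pvG pvOff
  cases cut with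
  | none => dsimp only; omega
  | some c =>
    unfold Pre_generate_unrotated_surface_code_grid at hpre
    dsimp only
    split_ifs with ha hb <;> omega
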